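-- pv_equiv track=rewrite | github.com/wenfei-li/deeptb_to_abacus | v2/deeptb_to_abacus.py | checkContiguous
-- ===== SOURCE A (Python) =====
-- def checkContiguous(arr, n):
--     # Keep track of visited elements
--     visited = set()
--     visited.add(arr[0])
--
--     for i in range(1, n):
--         if (arr[i] == arr[i - 1]):
--             continue
--         elif arr[i] in visited:
--             return 0
--         visited.add(arr[i])
--     return 1
-- ===== SOURCE B (Python) =====
-- def checkContiguous(arr, n):
--     # Build-then-check: compress into run-representative values, then test for a repeated run value.
--     runs = [arr[0]]
--     for i in range(1, n):
--         if arr[i] != arr[i - 1]: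
--             runs.append(arr[i])
--     return 0 if len(set(runs)) != len(runs) else 1
-- ===== Notes on version B (the rewrite author's own statement) =====
-- stated objective: alternative
-- what changed: Replaces A's interleaved visit-set accumulation with early return by a two-phase structure: one pass compresses the array into run-representative values, then a single set-cardinality check decides whether any run value repeats.
-- outside the precondition, e.g. on checkContiguous([1, 2, 1, 5], 5): A returns 0, B raises IndexError
import Mathlib
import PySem

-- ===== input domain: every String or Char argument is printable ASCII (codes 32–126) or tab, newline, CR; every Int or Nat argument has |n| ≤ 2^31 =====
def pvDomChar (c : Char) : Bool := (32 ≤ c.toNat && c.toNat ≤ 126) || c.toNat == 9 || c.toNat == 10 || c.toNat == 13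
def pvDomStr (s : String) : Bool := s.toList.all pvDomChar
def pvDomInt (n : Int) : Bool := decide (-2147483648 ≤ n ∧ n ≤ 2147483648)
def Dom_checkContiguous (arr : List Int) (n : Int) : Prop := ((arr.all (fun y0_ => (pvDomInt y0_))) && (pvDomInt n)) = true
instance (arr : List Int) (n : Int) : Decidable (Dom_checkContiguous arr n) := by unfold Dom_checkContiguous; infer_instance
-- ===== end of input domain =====

-- B restructures A's interleaved accumulate-and-early-return into build-runs-then-check; equivalence proved on nonempty arr with n ≤ len(arr).

-- ===== PORT A =====
-- A's 'for i in range(1, n)' as a counted loop; pyGet? models arr[i] (none = IndexError, which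
-- Pre_ excludes; the none branch returns a sentinel 0 there, outside every claim).
def pvLoopA (arr : List Int) (visited : PySem.Set Int) (i n : Int) : Int :=
  if i < n then
    match PySem.List.pyGet? arr i, PySem.List.pyGet? arr (i - 1) with
    | some ai, some ap =>
      if ai == ap then pvLoopA arr visited (i + 1) n
      else if PySem.Set.contains visited ai then 0
      else pvLoopA arr (PySem.Set.add visited ai) (i + 1) n
    | _, _ => 0
  else 1
termination_by (n - i).toNat
decreasing_by all_goals (simp_wf; omega)

def checkContiguous (arr : List Int) (n : Int) : Int :=
  pvLoopA arr (PySem.Set.add PySem.Set.empty (PySem.List.pyGetD arr 0 0)) 1 n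

-- ===== PORT B =====
-- B's run-building loop 'for i in range(1, n)'; same IndexError modelling as in port A.
def pvRuns (arr : List Int) (i n : Int) (rs : List Int) : List Int :=
  if i < n then
    match PySem.List.pyGet? arr i, PySem.List.pyGet? arr (i - 1) with
    | some ai, some ap => pvRuns arr (i + 1) n (if ai != ap then rs ++ [ai] else rs)
    | _, _ => rs
  else rs
termination_by (n - i).toNat
decreasing_by all_goals (simp_wf; omega)

def checkContiguous_alt (arr : List Int) (n : Int) : Int :=
  let runs : List Int := pvRuns arr 1 n [PySem.List.pyGetD arr 0 0]
  if ((PySem.Set.ofList runs).length : Int) != (runs.length : Int) then 0 else 1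

-- ===== PRECONDITION & SPEC =====
-- Pre_ excludes empty arr (arr[0] raises in both) and n > len(arr), where B's run-building pass always
-- raises IndexError while A may return 0 early before reaching the out-of-range index.
def Pre_checkContiguous (arr : List Int) (n : Int) : Prop := arr ≠ [] ∧ n ≤ (arr.length : Int)
instance (arr : List Int) (n : Int) : Decidable (Pre_checkContiguous arr n) := by unfold Pre_checkContiguous; infer_instance
def pvWitness_checkContiguous : List Int × Int := ([1, 2, 2, 3], 4)

def Spec_checkContiguous (arr : List Int) (n : Int) (out : Int) : Prop := out = checkContiguous_alt arr n
instance (arr : List Int) (n : Int) (out : Int) : Decidable (Spec_checkContiguous arr n out) := by unfold Spec_checkContiguous; infer_instance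

-- ===== CLAIM (what is proved, stated in full; the proofs are below) =====
def Claim_equal_checkContiguous : Prop := ∀ (arr : List Int) (n : Int), Dom_checkContiguous arr n → Pre_checkContiguous arr n → Spec_checkContiguous arr n (checkContiguous arr n)

-- ===== LEMMAS AND PROOFS =====

lemma pvRuns_eq_append (arr : List Int) (n : Int) :
    ∀ (fuel : Nat) (i : Int), (n - i).toNat = fuel → ∀ rs, ∃ t, pvRuns arr i n rs = rs ++ t := by
  intro fuel
  induction fuel with
  | zero =>
    intro i hi rs
    rw [pvRuns]
    have : ¬ i < n := by omega
    simp [this]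
  | succ k ih =>
    intro i hi rs
    rw [pvRuns]
    by_cases hlt : i < n
    · simp only [hlt, if_true]
      cases hgi : PySem.List.pyGet? arr i with
      | none => exact ⟨[], by simp⟩
      | some ai =>
        cases hgp : PySem.List.pyGet? arr (i - 1) with
        | none => exact ⟨[], by simp⟩
        | some ap =>
          by_cases hne : ai = ap
          · simpa [hne] using ih (i + 1) (by omega) rs
          · obtain ⟨t, ht⟩ := ih (i + 1) (by omega) (rs ++ [ai])
            exact ⟨ai :: t, by simp [hne, ht]⟩
    · simp [hlt]

-- The invariant: A's loop returns 1 exactly when B's completed run list has no duplicate.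
lemma pvLoop_eq_runs (arr : List Int) (n : Int) (hn : n ≤ (arr.length : Int)) :
    ∀ (fuel : Nat) (i : Int), (n - i).toNat = fuel → 1 ≤ i →
      ∀ runs : List Int, runs.Nodup →
        pvLoopA arr runs i n = if (pvRuns arr i n runs).Nodup then 1 else 0 := by
  intro fuel
  induction fuel with
  | zero =>
    intro i hi _ runs h
    have hge : ¬ i < n := by omega
    rw [pvLoopA, pvRuns]
    simp [hge, h]
  | succ k ih =>
    intro i hi h1 runs h
    rw [pvLoopA, pvRuns]
    by_cases hlt : i < n
    · have hisome : PySem.List.pyGet? arr i = some (arr[i.toNat]'(by omega)) :=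
        PySem.List.pyGet?_eq_some_getElem arr (i := i) (by omega) (by omega)
      have hpsome : PySem.List.pyGet? arr (i - 1) = some (arr[(i-1).toNat]'(by omega)) :=
        PySem.List.pyGet?_eq_some_getElem arr (i := i - 1) (by omega) (by omega)
      rw [hisome, hpsome]
      simp only [hlt, if_true]
      set ai := arr[i.toNat]'(by omega)
      set ap := arr[(i-1).toNat]'(by omega)
      by_cases heq : ai = ap
      · simpa [heq] using ih (i + 1) (by omega) (by omega) runs h
      · by_cases hmem : ai ∈ runs
        · obtain ⟨t, ht⟩ := pvRuns_eq_append arr n k (i + 1) (by omega) (runs ++ [ai])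
          have hnotnd : ¬ (pvRuns arr (i + 1) n (runs ++ [ai])).Nodup := by
            rw [ht]
            intro hnd
            rw [List.append_assoc] at hnd
            have hd := (List.nodup_append.mp hnd).2.2
            exact hd _ hmem _ (by simp) rfl
          simp [PySem.Set.contains, heq, hmem, hnotnd]
        · have hadd : PySem.Set.add runs ai = runs ++ [ai] := by
            simp [PySem.Set.add, PySem.Set.contains, hmem]
          have hnd : (runs ++ [ai]).Nodup := by
            rw [List.nodup_append]
            refine ⟨h, List.nodup_singleton _, ?_⟩
            intro a ha b hb hab
            simp at hb
            exact hmem (hb ▸ hab ▸ ha)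
          simpa [PySem.Set.contains, heq, hmem, hadd] using ih (i + 1) (by omega) (by omega) _ hnd
    · simp [hlt, h]

lemma pvOfList_length_aux :
    ∀ (xs s : List Int), (xs.foldl PySem.Set.add s).length ≤ s.length + xs.length ∧
      ((xs.foldl PySem.Set.add s).length = s.length + xs.length → (∀ x ∈ xs, x ∉ s) ∧ xs.Nodup) := by
  intro xs
  induction xs with
  | nil => intro s; simp
  | cons x xs ih =>
    intro s
    simp only [List.foldl_cons, List.length_cons]
    by_cases hx : x ∈ s
    · have hadd : PySem.Set.add s x = s := by simp [PySem.Set.add, PySem.Set.contains, hx]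
      rw [hadd]
      obtain ⟨h1, _⟩ := ih s
      exact ⟨by omega, by intro hc; omega⟩
    · have hadd : PySem.Set.add s x = s ++ [x] := by simp [PySem.Set.add, PySem.Set.contains, hx]
      rw [hadd]
      obtain ⟨h1, h2⟩ := ih (s ++ [x])
      rw [List.length_append] at h1 h2
      simp only [List.length_singleton] at h1 h2
      refine ⟨by omega, ?_⟩
      intro heq
      obtain ⟨ha, hb⟩ := h2 (by omega)
      refine ⟨?_, ?_⟩
      · intro y hy
        rcases List.mem_cons.mp hy with hyx | hy
        · exact hyx ▸ hx
        · intro hys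
          exact ha y hy (List.mem_append_left _ hys)
      · refine List.nodup_cons.mpr ⟨?_, hb⟩
        intro hxxs
        exact ha x hxxs (by simp)

-- len(set(runs)) == len(runs) iff runs has no duplicate.
lemma pvOfList_length_eq_iff (xs : List Int) :
    (PySem.Set.ofList xs).length = xs.length ↔ xs.Nodup := by
  constructor
  · intro h
    rw [PySem.Set.ofList_eq_foldl] at h
    exact ((pvOfList_length_aux xs []).2 (by simpa using h)).2
  · intro h
    rw [PySem.Set.ofList_eq_self_of_nodup xs h]

-- ===== VERDICT (by name: the statement is the Claim_ definition above) =====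
theorem checkContiguous_spec : Claim_equal_checkContiguous := by
  intro arr n _ hpre
  obtain ⟨hne, hn⟩ := hpre
  unfold Spec_checkContiguous checkContiguous checkContiguous_alt
  have h0 : PySem.Set.add PySem.Set.empty (PySem.List.pyGetD arr 0 0) = [PySem.List.pyGetD arr 0 0] := by
    simp [PySem.Set.add, PySem.Set.empty, PySem.Set.contains]
  rw [h0, pvLoop_eq_runs arr n hn (n - 1).toNat 1 (by omega) (by omega) _ (List.nodup_singleton _)]
  set runs := pvRuns arr 1 n [PySem.List.pyGetD arr 0 0] with hruns
  by_cases hnd : runs.Nodup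
  · have := (pvOfList_length_eq_iff runs).mpr hnd
    simp [hnd, this]
  · have hneq : (PySem.Set.ofList runs).length ≠ runs.length := fun h => hnd ((pvOfList_length_eq_iff runs).mp h)
    have : ((PySem.Set.ofList runs).length : Int) ≠ (runs.length : Int) := by exact_mod_cast hneq
    simp [hnd, this]
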